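-- pv_equiv track=rewrite | github.com/mbusc1/Python-Projects | q4solution/q4solution.py | min_key_order
-- ===== SOURCE A (Python) =====
-- def min_key_order(adict):
--     if not adict:
--         return
--     min_value = min(adict)
--     yield min_value,adict[min_value]
--     while True:
--         # Scan dict keys, finding min_bigger: the smallest one > min_value
--         min_bigger = None
--         for k in adict:
--             if k>min_value and (min_bigger == None or k<min_bigger):
--                 min_bigger = k
--         if min_bigger == None:
--             return
--         else:
--             min_value = min_bigger
--             yield min_value,adict[min_value]
-- ===== SOURCE B (Python) =====
-- def min_key_order(adict):
--     for k in sorted(adict):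
--         yield k, adict[k]
-- ===== Notes on version B (the rewrite author's own statement) =====
-- stated objective: faster
-- what changed: Replaces A's repeated O(n) scan for the next-smallest key with a single sort of the key list, then one pass yielding (key, adict[key]); Pre_ states the dict invariant (distinct keys), which every Python dict input satisfies.
import Mathlib
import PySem

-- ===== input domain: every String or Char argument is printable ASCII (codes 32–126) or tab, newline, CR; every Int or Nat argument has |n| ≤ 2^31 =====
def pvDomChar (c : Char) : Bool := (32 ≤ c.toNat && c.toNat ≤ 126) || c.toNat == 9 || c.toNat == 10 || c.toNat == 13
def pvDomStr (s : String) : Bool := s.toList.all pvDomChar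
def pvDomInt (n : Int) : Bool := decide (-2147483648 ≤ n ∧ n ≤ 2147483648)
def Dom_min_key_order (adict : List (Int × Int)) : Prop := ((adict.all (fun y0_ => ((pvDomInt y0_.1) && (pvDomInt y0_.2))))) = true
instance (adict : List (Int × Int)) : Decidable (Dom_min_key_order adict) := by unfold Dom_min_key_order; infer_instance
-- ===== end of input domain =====

-- B replaces A's repeated min-scan over the keys with one sort of the key list followed by a
-- single lookup pass (objective: faster).

-- ===== PORT A =====
-- adict[k]: Python dict lookup = first match in the association list (keys looked up below always present)
def dlookup : List (Int × Int) → Int → Int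
  | [], _ => 0            -- KeyError in Python; unreachable: looked-up keys come from the list itself
  | (k, v) :: rest, x => if k = x then v else dlookup rest x

-- body of "for k in adict: if k>min_value and (min_bigger == None or k<min_bigger): min_bigger = k"
def scanStep (m : Int) (mb : Option Int) (k : Int) : Option Int :=
  match mb with
  | none => if m < k then some k else none
  | some b => if m < k ∧ k < b then some k else some b

def scanBigger (m : Int) (keys : List Int) : Option Int :=
  keys.foldl (scanStep m) none

-- scan_measure_lt is cited by aLoop's decreasing_by, so it must precede aLoop; it is self-contained
theorem scan_measure_lt (keys : List Int) (m b : Int) (h : scanBigger m keys = some b) :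
    (keys.filter (fun k => decide (b < k))).length < (keys.filter (fun k => decide (m < k))).length := by
  have aux : ∀ (t : List Int) (mb : Option Int), (∀ b0, mb = some b0 → m < b0 ∧ b0 ∈ keys) →
      t.Sublist keys → t.foldl (scanStep m) mb = some b → m < b ∧ b ∈ keys := by
    intro t
    induction t with
    | nil =>
      intro mb hmb _ hf
      simp only [List.foldl] at hf
      exact hmb b hf
    | cons k u ih =>
      intro mb hmb hsub hf
      rw [List.foldl_cons] at hf
      refine ih (scanStep m mb k) ?_ (List.sublist_of_cons_sublist hsub) hf
      intro b0 hb0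
      have hkmem : k ∈ keys := hsub.mem List.mem_cons_self
      cases mb with
      | none =>
        simp only [scanStep] at hb0
        split_ifs at hb0 with hc
        · cases hb0; exact ⟨hc, hkmem⟩
      | some b1 =>
        simp only [scanStep] at hb0
        split_ifs at hb0 with hc
        · cases hb0; exact ⟨hc.1, hkmem⟩
        · cases hb0; exact hmb _ rfl
  obtain ⟨hmb, hbmem⟩ := aux keys none (by simp) (List.Sublist.refl keys) h
  clear h aux
  induction keys with
  | nil => simp at hbmem
  | cons k t ih =>
    have hmono : (t.filter (fun k => decide (b < k))).length ≤ (t.filter (fun k => decide (m < k))).length :=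
      (List.monotone_filter_right t (by intro a ha; simp at ha ⊢; omega)).length_le
    rcases List.mem_cons.mp hbmem with rfl | hbt
    · simp [hmb]
      omega
    · have hih := ih hbt
      by_cases h1 : b < k
      · have h2 : m < k := lt_trans hmb h1
        simp [h1, h2]
        omega
      · by_cases h2 : m < k
        · simp [h1, h2]
          omega
        · simp [h1, h2]
          omega

-- the "while True" loop of A: emit the smallest key > m, repeat
def aLoop (adict : List (Int × Int)) (m : Int) : List (Int × Int) :=
  match h : scanBigger m (adict.map Prod.fst) with
  | none => []
  | some b => (b, dlookup adict b) :: aLoop adict b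
termination_by ((adict.map Prod.fst).filter (fun k => decide (m < k))).length
decreasing_by
  exact scan_measure_lt (adict.map Prod.fst) m b h

def min_key_order (adict : List (Int × Int)) : List (Int × Int) :=
  if adict = [] then []
  else
    match PySem.List.min? (adict.map Prod.fst) (fun k => k) with
    | none => []          -- unreachable: adict ≠ []
    | some m => (m, dlookup adict m) :: aLoop adict m

-- ===== PORT B =====
def min_key_order_alt (adict : List (Int × Int)) : List (Int × Int) :=
  (PySem.List.sorted (adict.map Prod.fst) (fun k => k) false).map (fun k => (k, dlookup adict k))

-- ===== PRECONDITION & SPEC =====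
-- Pre_ is the Python dict invariant: the association list has pairwise-distinct keys. A duplicate
-- key cannot occur in any Python dict, so no input the Python A accepts is excluded.
def Pre_min_key_order (adict : List (Int × Int)) : Prop := (adict.map Prod.fst).Nodup
instance (adict : List (Int × Int)) : Decidable (Pre_min_key_order adict) := by unfold Pre_min_key_order; infer_instance

def pvWitness_min_key_order : (List (Int × Int)) := [(3, 1), (1, 2), (2, 0)]

def Spec_min_key_order (adict : List (Int × Int)) (out : List (Int × Int)) : Prop := out = min_key_order_alt adict
instance (adict : List (Int × Int)) (out : List (Int × Int)) : Decidable (Spec_min_key_order adict out) := by unfold Spec_min_key_order; infer_instance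

-- ===== CLAIM (what is proved, stated in full; the proofs are below) =====
def Claim_equal_min_key_order : Prop := ∀ (adict : List (Int × Int)), Dom_min_key_order adict → Pre_min_key_order adict → Spec_min_key_order adict (min_key_order adict)

-- ===== LEMMAS AND PROOFS =====

-- characterisation of A's inner scan (used by aLoop_eq below)
theorem scan_from_some (m : Int) (keys : List Int) : ∀ (b : Int),
    keys.foldl (scanStep m) (some b) ≠ none := by
  induction keys with
  | nil => intro b h; simp at h
  | cons k t ih =>
    intro b
    by_cases hc : m < k ∧ k < b
    · simpa [List.foldl, scanStep, hc] using ih k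
    · simpa [List.foldl, scanStep, hc] using ih b

theorem scan_some (m : Int) (keys : List Int) : ∀ (mb : Option Int) (b : Int),
    (∀ b0, mb = some b0 → m < b0) →
    keys.foldl (scanStep m) mb = some b →
    m < b ∧ (b ∈ keys ∨ mb = some b) ∧ (∀ k ∈ keys, m < k → b ≤ k) ∧
      (∀ b0, mb = some b0 → b ≤ b0) := by
  induction keys with
  | nil =>
    intro mb b hmb h
    simp only [List.foldl] at h
    exact ⟨hmb b h, Or.inr h, by simp, fun b0 h0 => by rw [h0] at h; cases h; exact le_refl _⟩
  | cons k t ih =>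
    intro mb b hmb h
    cases mb with
    | none =>
      by_cases hk : m < k
      · rw [List.foldl_cons, show scanStep m none k = some k by simp [scanStep, hk]] at h
        obtain ⟨h1, h2, h3, h4⟩ := ih (some k) b (by intro b0 e; cases e; exact hk) h
        have hbk : b ≤ k := h4 k rfl
        refine ⟨h1, ?_, ?_, by simp⟩
        · rcases h2 with h2 | h2
          · exact Or.inl (List.mem_cons_of_mem _ h2)
          · cases h2; exact Or.inl List.mem_cons_self
        · intro k' hk' hm'
          rcases List.mem_cons.mp hk' with rfl | hk'
          · exact hbk
          · exact h3 k' hk' hm'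
      · rw [List.foldl_cons, show scanStep m none k = none by simp [scanStep, hk]] at h
        obtain ⟨h1, h2, h3, h4⟩ := ih none b (by simp) h
        refine ⟨h1, ?_, ?_, by simp⟩
        · rcases h2 with h2 | h2
          · exact Or.inl (List.mem_cons_of_mem _ h2)
          · simp at h2
        · intro k' hk' hm'
          rcases List.mem_cons.mp hk' with rfl | hk'
          · exact absurd hm' hk
          · exact h3 k' hk' hm'
    | some b1 =>
      have hb1 : m < b1 := hmb b1 rfl
      by_cases hc : m < k ∧ k < b1
      · rw [List.foldl_cons, show scanStep m (some b1) k = some k by simp [scanStep, hc]] at h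
        obtain ⟨h1, h2, h3, h4⟩ := ih (some k) b (by intro b0 e; cases e; exact hc.1) h
        have hbk : b ≤ k := h4 k rfl
        refine ⟨h1, ?_, ?_, ?_⟩
        · rcases h2 with h2 | h2
          · exact Or.inl (List.mem_cons_of_mem _ h2)
          · cases h2; exact Or.inl List.mem_cons_self
        · intro k' hk' hm'
          rcases List.mem_cons.mp hk' with rfl | hk'
          · exact hbk
          · exact h3 k' hk' hm'
        · intro b0 e; cases e; exact le_of_lt (lt_of_le_of_lt hbk hc.2)
      · rw [List.foldl_cons, show scanStep m (some b1) k = some b1 by simp [scanStep, hc]] at h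
        obtain ⟨h1, h2, h3, h4⟩ := ih (some b1) b (by intro b0 e; cases e; exact hb1) h
        have hbb1 : b ≤ b1 := h4 b1 rfl
        refine ⟨h1, ?_, ?_, ?_⟩
        · rcases h2 with h2 | h2
          · exact Or.inl (List.mem_cons_of_mem _ h2)
          · exact Or.inr h2
        · intro k' hk' hm'
          rcases List.mem_cons.mp hk' with rfl | hk'
          · have : b1 ≤ k' := by
              rcases not_and_or.mp hc with h' | h'
              · exact absurd hm' h'
              · omega
            exact le_trans hbb1 this
          · exact h3 k' hk' hm'
        · intro b0 e; cases e; exact hbb1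

theorem scan_none (m : Int) (keys : List Int) : ∀ (mb : Option Int),
    keys.foldl (scanStep m) mb = none → mb = none ∧ ∀ k ∈ keys, ¬ m < k := by
  induction keys with
  | nil => intro mb h; simp only [List.foldl] at h; exact ⟨h, by simp⟩
  | cons k t ih =>
    intro mb h
    cases mb with
    | none =>
      by_cases hk : m < k
      · rw [List.foldl_cons, show scanStep m none k = some k by simp [scanStep, hk]] at h
        exact absurd h (scan_from_some m t k)
      · rw [List.foldl_cons, show scanStep m none k = none by simp [scanStep, hk]] at h
        obtain ⟨-, h2⟩ := ih none h
        refine ⟨rfl, ?_⟩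
        intro k' hk'
        rcases List.mem_cons.mp hk' with rfl | hk'
        · exact hk
        · exact h2 k' hk'
    | some b1 =>
      rw [List.foldl_cons] at h
      cases hs : scanStep m (some b1) k with
      | none => simp only [scanStep] at hs; split_ifs at hs <;> simp_all
      | some b2 => rw [hs] at h; exact absurd h (scan_from_some m t b2)

theorem scanBigger_some (m : Int) (keys : List Int) (b : Int) (h : scanBigger m keys = some b) :
    m < b ∧ b ∈ keys ∧ ∀ k ∈ keys, m < k → b ≤ k := by
  obtain ⟨h1, h2, h3, -⟩ := scan_some m keys none b (by simp) h
  rcases h2 with h2 | h2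
  · exact ⟨h1, h2, h3⟩
  · simp at h2

theorem scanBigger_none (m : Int) (keys : List Int) (h : scanBigger m keys = none) :
    ∀ k ∈ keys, ¬ m < k := (scan_none m keys none h).2


-- aLoop emits exactly the strictly-increasing list of the keys greater than m
theorem aLoop_eq (adict : List (Int × Int)) :
    ∀ (s : List Int), s.Pairwise (· < ·) → ∀ (m : Int),
      (∀ k, k ∈ s ↔ k ∈ adict.map Prod.fst ∧ m < k) →
      aLoop adict m = s.map (fun k => (k, dlookup adict k)) := by
  intro s
  induction s with
  | nil =>
    intro _ m hch
    rw [aLoop]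
    split
    · simp
    · next b hs =>
      obtain ⟨h1, h2, -⟩ := scanBigger_some _ _ _ hs
      exact absurd ((hch b).mpr ⟨h2, h1⟩) (List.not_mem_nil)
  | cons b rest ih =>
    intro hp m hch
    have hpb := List.pairwise_cons.mp hp
    have hb := (hch b).mp List.mem_cons_self
    rw [aLoop]
    split
    · next hs => exact absurd hb.2 (scanBigger_none _ _ hs b hb.1)
    · next b' hs =>
      obtain ⟨h1, h2, h3⟩ := scanBigger_some _ _ _ hs
      have hbb : b' = b := by
        have h4 : b' ≤ b := h3 b hb.1 hb.2
        have hmem : b' ∈ b :: rest := (hch b').mpr ⟨h2, h1⟩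
        rcases List.mem_cons.mp hmem with rfl | hmem
        · rfl
        · have := hpb.1 b' hmem; omega
      subst hbb
      simp only [List.map_cons]
      refine congrArg (List.cons _) (ih hpb.2 b' ?_)
      intro k
      constructor
      · intro hk
        exact ⟨((hch k).mp (List.mem_cons_of_mem _ hk)).1, hpb.1 k hk⟩
      · rintro ⟨hk1, hk2⟩
        have hmem : k ∈ b' :: rest := (hch k).mpr ⟨hk1, lt_trans h1 hk2⟩
        rcases List.mem_cons.mp hmem with rfl | hmem2
        · omega
        · exact hmem2

-- ===== VERDICT (by name: the statement is the Claim_ definition above) =====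
theorem min_key_order_spec : Claim_equal_min_key_order := by
  intro adict _ hpre
  unfold Spec_min_key_order
  unfold min_key_order min_key_order_alt
  by_cases hnil : adict = []
  · subst hnil
    decide
  · simp only [if_neg hnil]
    have hkeys : adict.map Prod.fst ≠ [] := by
      intro h; exact hnil (List.map_eq_nil_iff.mp h)
    -- the sorted key list is strictly increasing (distinct keys)
    have hperm : (PySem.List.sorted (adict.map Prod.fst) (fun k => k) false).Perm (adict.map Prod.fst) :=
      PySem.List.sorted_perm _ _ _
    have hnd : (PySem.List.sorted (adict.map Prod.fst) (fun k => k) false).Nodup :=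
      hperm.nodup_iff.mpr hpre
    have hle : (PySem.List.sorted (adict.map Prod.fst) (fun k => k) false).Pairwise (· ≤ ·) := by
      simpa using PySem.List.sorted_pairwise (adict.map Prod.fst) (fun k => k)
    have hlt : (PySem.List.sorted (adict.map Prod.fst) (fun k => k) false).Pairwise (· < ·) :=
      (hle.and hnd).imp (fun h => lt_of_le_of_ne h.1 h.2)
    have hmems : ∀ k, k ∈ PySem.List.sorted (adict.map Prod.fst) (fun k => k) false ↔ k ∈ adict.map Prod.fst :=
      fun k => hperm.mem_iff
    split
    · next hmin =>
      exact absurd ((PySem.List.min?_eq_none_iff _ _).mp hmin) hkeys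
    · next m0 hmin =>
      have hm0mem : m0 ∈ adict.map Prod.fst := PySem.List.min?_mem hmin
      have hm0min : ∀ y ∈ adict.map Prod.fst, m0 ≤ y := by
        intro y hy
        simpa using PySem.List.min?_isMin hmin y hy
      cases hs : PySem.List.sorted (adict.map Prod.fst) (fun k => k) false with
      | nil =>
        have h0 := hperm
        rw [hs] at h0
        exact absurd h0.symm.eq_nil hkeys
      | cons h0 rest =>
        rw [hs] at hlt hmems
        have hpb := List.pairwise_cons.mp hlt
        have hh0 : h0 = m0 := by
          have h1 : m0 ≤ h0 := hm0min h0 ((hmems h0).mp List.mem_cons_self)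
          rcases List.mem_cons.mp ((hmems m0).mpr hm0mem) with rfl | hmem
          · rfl
          · have := hpb.1 m0 hmem; omega
        subst hh0
        have hrest : ∀ k, k ∈ rest ↔ k ∈ adict.map Prod.fst ∧ h0 < k := by
          intro k
          constructor
          · intro hk
            exact ⟨(hmems k).mp (List.mem_cons_of_mem _ hk), hpb.1 k hk⟩
          · rintro ⟨hk1, hk2⟩
            rcases List.mem_cons.mp ((hmems k).mpr hk1) with rfl | h
            · omega
            · exact h
        rw [aLoop_eq adict rest hpb.2 h0 hrest]
        simp
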